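-- pv_equiv track=rewrite | github.com/ellynhan/challenge100-codingtest-study | SeongHyun/2022_kakao_codingtest_1.py | solution
-- ===== SOURCE A (Python) =====
-- def solution(id_list, report, k):
--     answer = []
--     report_set = set(report)
--     result = {user:[] for user in id_list}
--     alert_count = {user:0 for user in id_list}
--
--     for elem in report_set:
--         user, alert = elem.split(" ")
--         result[user].append(alert)
--         alert_count[alert]+=1
--
--     for user in id_list:
--         count = 0
--         for alert in result[user]:
--             if alert_count[alert] >=k:
--                 count+=1
--         answer.append(count)
--     return answer
-- ===== SOURCE B (Python) =====
-- def solution(id_list, report, k):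
--     # Inverted index: reported person -> list of reporters (from deduplicated reports);
--     # add 1 to each reporter of every person reported by at least k distinct users.
--     reporters = {user: [] for user in id_list}
--     for r in set(report):
--         src, dst = r.split(" ")
--         reporters[dst].append(src)
--     result = {user: 0 for user in id_list}
--     for dst in reporters:
--         if len(reporters[dst]) >= k:
--             for src in reporters[dst]:
--                 result[src] += 1
--     return [result[user] for user in id_list]
-- ===== Notes on version B (the rewrite author's own statement) =====
-- stated objective: alternative
-- what changed: Replaces A's reporter->reported grouping plus per-user rescan of alert counts with an inverted index reported->reporters: suspended persons are found by reporter-list length and each of their reporters is credited once, so the per-user inner filtering loop disappears.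
import Mathlib
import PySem

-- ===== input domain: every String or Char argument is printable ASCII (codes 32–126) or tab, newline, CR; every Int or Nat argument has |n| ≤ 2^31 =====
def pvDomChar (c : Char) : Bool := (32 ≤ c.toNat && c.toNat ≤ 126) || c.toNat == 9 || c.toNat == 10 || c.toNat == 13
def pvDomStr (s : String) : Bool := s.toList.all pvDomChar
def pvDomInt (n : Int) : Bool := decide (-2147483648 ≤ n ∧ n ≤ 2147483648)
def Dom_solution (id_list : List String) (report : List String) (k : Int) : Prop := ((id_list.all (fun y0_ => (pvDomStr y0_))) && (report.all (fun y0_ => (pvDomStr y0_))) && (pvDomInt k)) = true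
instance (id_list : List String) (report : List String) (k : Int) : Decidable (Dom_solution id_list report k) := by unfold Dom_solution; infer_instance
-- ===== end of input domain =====

-- B replaces A's reporter->reported grouping and per-user rescan by an inverted index
-- reported->reporters, crediting the reporters of each suspended person (alternative decomposition).

-- shared helper: `u, a = r.split(" ")` — some (u, a) iff the split has exactly two parts (else Python raises ValueError)
def pvParse (r : String) : Option (String × String) :=
  match PySem.Str.split? r " " with
  | some [u, a] => some (u, a)
  | _ => none

-- ===== PORT A =====
def solution (id_list : List String) (report : List String) (k : Int) : List Int :=
  let report_set := PySem.Set.ofList report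
  let result : PySem.Dict String (List String) :=
    id_list.foldl (fun d user => d.insert user []) PySem.Dict.empty
  let alert_count : PySem.Dict String Int :=
    id_list.foldl (fun d user => d.insert user 0) PySem.Dict.empty
  -- first loop; Python raises KeyError when user/alert is missing — excluded by Pre_ (modify's default is never used there)
  let st :=
    report_set.foldl
      (fun (st : PySem.Dict String (List String) × PySem.Dict String Int) elem =>
        match pvParse elem with
        | some (user, alert) =>
            (st.1.modify user [] (· ++ [alert]), st.2.modify alert 0 (· + 1))
        | none => st)
      (result, alert_count)
  id_list.foldl
    (fun answer user =>
      answer ++ [(st.1.getD user []).foldl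
        (fun count alert => if st.2.getD alert 0 ≥ k then count + 1 else count) 0])
    []

-- ===== PORT B =====
def solution_alt (id_list : List String) (report : List String) (k : Int) : List Int :=
  let reporters0 : PySem.Dict String (List String) :=
    id_list.foldl (fun d user => d.insert user []) PySem.Dict.empty
  let reporters :=
    (PySem.Set.ofList report).foldl
      (fun d r =>
        match pvParse r with
        | some (src, dst) => d.modify dst [] (· ++ [src])
        | none => d)
      reporters0
  let result0 : PySem.Dict String Int :=
    id_list.foldl (fun d user => d.insert user 0) PySem.Dict.empty
  let result :=
    reporters.keys.foldl
      (fun res dst =>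
        if ((reporters.getD dst []).length : Int) ≥ k then
          (reporters.getD dst []).foldl (fun res src => res.modify src 0 (· + 1)) res
        else res)
      result0
  id_list.map (fun user => result.getD user 0)

-- ===== PRECONDITION & SPEC =====
-- Pre_ is exactly A's returning domain: every report line splits on " " into exactly two
-- parts (else ValueError) and both parts occur in id_list (else KeyError).
def Pre_solution (id_list : List String) (report : List String) (k : Int) : Prop :=
  ∀ r ∈ report, ∃ u ∈ id_list, ∃ a ∈ id_list, pvParse r = some (u, a)
instance (id_list : List String) (report : List String) (k : Int) : Decidable (Pre_solution id_list report k) := by unfold Pre_solution; infer_instance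
def pvWitness_solution : List String × List String × Int := (["muzi", "frodo"], ["muzi frodo"], 1)
def Spec_solution (id_list : List String) (report : List String) (k : Int) (out : List Int) : Prop := out = solution_alt id_list report k
instance (id_list : List String) (report : List String) (k : Int) (out : List Int) : Decidable (Spec_solution id_list report k out) := by unfold Spec_solution; infer_instance

-- ===== CLAIM (what is proved, stated in full; the proofs are below) =====
def Claim_equal_solution : Prop := ∀ (id_list : List String) (report : List String) (k : Int), Dom_solution id_list report k → Pre_solution id_list report k → Spec_solution id_list report k (solution id_list report k)

-- ===== LEMMAS AND PROOFS =====

-- the deduplicated, parsed report pairs (reporter, reported), and the per-person report count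
def pvPairs (report : List String) : List (String × String) :=
  (PySem.Set.ofList report).filterMap pvParse

def pvCnt (report : List String) (a : String) : Nat :=
  (pvPairs report).countP (fun p => p.2 == a)

-- initializing a dict with a constant value c leaves every getD-with-default-c at c
theorem getD_foldl_insert_const {ν : Type} (l : List String) (d : PySem.Dict String ν) (c : ν)
    (x : String) (hd : d.getD x c = c) :
    (l.foldl (fun d u => d.insert u c) d).getD x c = c := by
  induction l generalizing d with
  | nil => exact hd
  | cons u l ih =>
    refine ih _ ?_
    rw [PySem.Dict.getD_insert]
    split <;> [rfl; exact hd]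

-- Set.update with elements already present is the identity
theorem set_update_of_mem (s : PySem.Set String) (xs : List String) (h : ∀ x ∈ xs, x ∈ s) :
    PySem.Set.update s xs = s := by
  induction xs generalizing s with
  | nil => rfl
  | cons x xs ih =>
    have hx : PySem.Set.add s x = s := by
      simp [PySem.Set.add, List.elem_eq_contains, List.contains_iff_mem, h x (by simp)]
    simp only [PySem.Set.update, List.foldl_cons]
    have := ih (PySem.Set.add s x) (by rw [hx]; exact fun y hy => h y (by simp [hy]))
    simpa [PySem.Set.update, hx] using this

-- summing an equality indicator over a duplicate-free list containing x gives 1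
theorem sum_indicator (K : List String) (hK : K.Nodup) (x : String) :
    (K.map (fun d => if x = d then (1:Int) else 0)).sum = if x ∈ K then 1 else 0 := by
  induction K with
  | nil => simp
  | cons d K ih =>
    rcases List.nodup_cons.mp hK with ⟨hd, hK'⟩
    by_cases hx : x = d
    · subst hx
      simp only [List.map_cons, List.sum_cons, if_pos rfl, List.mem_cons, true_or, if_pos]
      have : (K.map (fun d => if x = d then (1:Int) else 0)).sum = 0 := by
        rw [ih hK']
        simp [fun h => hd h]
      omega
    · simp only [List.map_cons, List.sum_cons, if_neg hx, ih hK', List.mem_cons]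
      simp [hx]

-- counting over pairs partitions into a sum over the (duplicate-free) keys of the second components
theorem countP_partition (P : String × String → Bool) (l : List (String × String)) (K : List String)
    (hK : K.Nodup) (hl : ∀ p ∈ l, P p = true → p.2 ∈ K) :
    (l.countP P : Int) = (K.map (fun d => (l.countP (fun p => P p && (p.2 == d)) : Int))).sum := by
  induction l with
  | nil => simp
  | cons a l ih =>
    have hl' : ∀ p ∈ l, P p = true → p.2 ∈ K := fun p hp => hl p (List.mem_cons_of_mem _ hp)
    have step : ∀ d : String,
        ((a :: l).countP (fun p => P p && (p.2 == d)) : Int)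
        = (l.countP (fun p => P p && (p.2 == d)) : Int)
          + (if P a = true ∧ a.2 = d then (1:Int) else 0) := by
      intro d
      rw [List.countP_cons]
      by_cases h : P a = true ∧ a.2 = d
      · simp [h.1, h.2]
      · have : (P a && (a.2 == d)) = false := by
          rcases Decidable.not_and_iff_not_or_not.mp h with h1 | h2
          · simp [Bool.eq_false_iff.mpr h1]
          · simp [beq_eq_false_iff_ne.mpr h2]
        simp [this, h]
    have hsplit :
        (K.map (fun d => ((a :: l).countP (fun p => P p && (p.2 == d)) : Int))).sum
        = (K.map (fun d => (l.countP (fun p => P p && (p.2 == d)) : Int))).sum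
          + (K.map (fun d => if P a = true ∧ a.2 = d then (1:Int) else 0)).sum := by
      rw [← PySem.List.sum_map_add_int]
      congr 1
      exact List.map_congr_left (fun d _ => step d)
    rw [List.countP_cons, hsplit, ← ih hl']
    by_cases hPa : P a = true
    · have hmem : a.2 ∈ K := hl a (List.mem_cons_self) hPa
      have : (K.map (fun d => if P a = true ∧ a.2 = d then (1:Int) else 0)).sum
           = (K.map (fun d => if a.2 = d then (1:Int) else 0)).sum := by
        congr 1
        exact List.map_congr_left (fun d _ => by simp [hPa])
      rw [this, sum_indicator K hK a.2]
      simp only [hPa, if_pos hmem, if_true]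
      push_cast
      ring
    · have : (K.map (fun d => if P a = true ∧ a.2 = d then (1:Int) else 0)).sum
           = (K.map (fun _ => (0:Int))).sum := by
        congr 1
        exact List.map_congr_left (fun d _ => by simp [hPa])
      rw [this]
      simp [hPa]

-- B's outer loop: total credited to u is the sum over suspended persons of u's reports of them
theorem getD_suspend_fold (R : String → List String) (cond : String → Prop) [DecidablePred cond]
    (K : List String) (res : PySem.Dict String Int) (u : String) :
    (K.foldl (fun res dst =>
        if cond dst then (R dst).foldl (fun r s => r.modify s 0 (· + 1)) res else res) res).getD u 0
    = res.getD u 0 + (K.map (fun d => if cond d then (((R d).count u : Int)) else 0)).sum := by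
  induction K generalizing res with
  | nil => simp
  | cons d K ih =>
    by_cases h : cond d
    · simp only [List.foldl_cons, if_pos h, ih, PySem.Dict.getD_foldl_modify_add_one,
        List.map_cons, List.sum_cons, if_pos h]
      ring
    · simp only [List.foldl_cons, if_neg h, ih, List.map_cons, List.sum_cons, if_neg h]
      ring

-- A's per-user inner loop counts with a decidable test
theorem foldl_count_if_prop (p : String → Prop) [DecidablePred p] (l : List String) :
    l.foldl (fun c a => if p a then c + 1 else c) (0:Int) = (l.countP (fun a => decide (p a)) : Int) := by
  have := PySem.List.foldl_count_if (fun a => decide (p a)) l 0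
  simpa using this

-- every parsed pair has both components in id_list
theorem pairs_mem (id_list report : List String) (k : Int) (hpre : Pre_solution id_list report k) :
    ∀ p ∈ pvPairs report, p.1 ∈ id_list ∧ p.2 ∈ id_list := by
  intro p hp
  rcases List.mem_filterMap.mp hp with ⟨r, hr, hparse⟩
  rcases hpre r ((PySem.Set.mem_ofList report r).mp hr) with ⟨u, hu, a, ha, heq⟩
  rw [heq] at hparse
  cases hparse
  exact ⟨hu, ha⟩

-- the two per-d summands agree
theorem per_d_eq (k : Int) (report : List String) (u d : String) :
    ((pvPairs report).countP
        (fun p => decide (k ≤ (pvCnt report p.2 : Int)) && (p.1 == u) && (p.2 == d)) : Int)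
    = if ((((pvPairs report).filter (fun p => p.2 == d)).map (fun p => p.1)).length : Int) ≥ k
      then (((((pvPairs report).filter (fun p => p.2 == d)).map (fun p => p.1)).count u : Int))
      else 0 := by
  have hlen : ((((pvPairs report).filter (fun p => p.2 == d)).map (fun p => p.1)).length : Int)
      = (pvCnt report d : Int) := by
    simp [pvCnt, ← List.countP_eq_length_filter]
  by_cases hk : k ≤ (pvCnt report d : Int)
  · rw [if_pos (by rw [hlen]; exact hk)]
    have hpred : ((pvPairs report).countP
        (fun p => decide (k ≤ (pvCnt report p.2 : Int)) && (p.1 == u) && (p.2 == d)))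
        = ((pvPairs report).countP (fun p => (p.1 == u) && (p.2 == d))) := by
      apply List.countP_congr
      intro p _
      by_cases hpd : p.2 = d
      · simp [hpd, hk]
      · simp [beq_eq_false_iff_ne.mpr hpd]
    rw [hpred]
    have : ((((pvPairs report).filter (fun p => p.2 == d)).map (fun p => p.1)).count u)
        = ((pvPairs report).countP (fun p => (p.1 == u) && (p.2 == d))) := by
      rw [List.count, List.countP_map, List.countP_filter]
      rfl
    rw [this]
  · rw [if_neg (by rw [hlen]; exact hk)]
    have : ((pvPairs report).countP
        (fun p => decide (k ≤ (pvCnt report p.2 : Int)) && (p.1 == u) && (p.2 == d))) = 0 := by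
      rw [List.countP_eq_zero]
      intro p _
      by_cases hpd : p.2 = d
      · simp [hpd, hk]
      · simp [beq_eq_false_iff_ne.mpr hpd]
    rw [this]
    rfl


-- the reporters of person d, in dedup-report order
def pvR (report : List String) (d : String) : List String :=
  ((pvPairs report).filter (fun p => p.2 == d)).map (fun p => p.1)

-- A's first loop, fst component: groups reported persons under each reporter
theorem stA_fst (l : List String) (i1 : PySem.Dict String (List String)) (i2 : PySem.Dict String Int) :
    (l.foldl
      (fun (st : PySem.Dict String (List String) × PySem.Dict String Int) elem =>
        match pvParse elem with
        | some (user, alert) =>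
            (st.1.modify user [] (· ++ [alert]), st.2.modify alert 0 (· + 1))
        | none => st)
      (i1, i2)).1
    = (l.filterMap pvParse).foldl (fun d p => d.modify p.1 [] fun x => x ++ [p.2]) i1 := by
  induction l generalizing i1 i2 with
  | nil => rfl
  | cons r l ih =>
    cases h : pvParse r with
    | none => simp [h, ih, List.filterMap_cons]
    | some p => obtain ⟨u, a⟩ := p; simp [h, ih, List.filterMap_cons]

-- A's first loop, snd component: counts how often each person was reported
theorem stA_snd (l : List String) (i1 : PySem.Dict String (List String)) (i2 : PySem.Dict String Int) :
    (l.foldl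
      (fun (st : PySem.Dict String (List String) × PySem.Dict String Int) elem =>
        match pvParse elem with
        | some (user, alert) =>
            (st.1.modify user [] (· ++ [alert]), st.2.modify alert 0 (· + 1))
        | none => st)
      (i1, i2)).2
    = ((l.filterMap pvParse).map (fun p => p.2)).foldl (fun d x => d.modify x 0 fun x => x + 1) i2 := by
  induction l generalizing i1 i2 with
  | nil => rfl
  | cons r l ih =>
    cases h : pvParse r with
    | none => simp [h, ih, List.filterMap_cons]
    | some p => obtain ⟨u, a⟩ := p; simp [h, ih, List.filterMap_cons]

-- B's first loop: the inverted index is a grouping fold over the swapped pairs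
theorem reporters_fold (l : List String) (i : PySem.Dict String (List String)) :
    l.foldl
      (fun d r =>
        match pvParse r with
        | some (src, dst) => d.modify dst [] (· ++ [src])
        | none => d) i
    = ((l.filterMap pvParse).map Prod.swap).foldl (fun d p => d.modify p.1 [] fun x => x ++ [p.2]) i := by
  induction l generalizing i with
  | nil => rfl
  | cons r l ih =>
    cases h : pvParse r with
    | none => simp [h, ih, List.filterMap_cons]
    | some p => obtain ⟨u, a⟩ := p; simp [h, ih, List.filterMap_cons, Prod.swap]

-- A computes, per user, the number of their distinct reports whose target reached k reports
theorem solution_eq (id_list report : List String) (k : Int) :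
    solution id_list report k
    = id_list.map (fun u =>
        (((pvPairs report).countP
          (fun p => decide (k ≤ (pvCnt report p.2 : Int)) && (p.1 == u))) : Int)) := by
  simp only [solution]
  simp only [stA_fst, stA_snd]
  have hcnt : ∀ a : String,
      (((PySem.Set.ofList report).filterMap pvParse).map (fun p => p.2)).count a
      = pvCnt report a := by
    intro a
    rw [List.count_eq_countP, List.countP_map]
    rfl
  simp only [PySem.Dict.getD_foldl_modify_append, PySem.Dict.getD_foldl_modify_add_one,
    getD_foldl_insert_const _ _ _ _ (PySem.Dict.getD_empty _ _), List.nil_append, zero_add, hcnt]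
  rw [PySem.List.foldl_append_singleton_eq_map, List.nil_append]
  refine List.map_congr_left (fun u _ => ?_)
  rw [foldl_count_if_prop (fun a => pvCnt report a ≥ k)]
  rw [List.countP_map, List.countP_filter]
  congr 1

-- B computes, per user, the credits received from each suspended person's reporter list
theorem solution_alt_eq (id_list report : List String) (k : Int)
    (hpre : Pre_solution id_list report k) :
    solution_alt id_list report k
    = id_list.map (fun u =>
        ((PySem.Set.ofList id_list).map (fun d =>
          if ((pvR report d).length : Int) ≥ k then ((pvR report d).count u : Int) else 0)).sum) := by
  simp only [solution_alt]
  simp only [reporters_fold]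
  have hswap : ∀ d : String,
      ((((PySem.Set.ofList report).filterMap pvParse).map Prod.swap).filter
          (fun p => p.1 == d)).map (fun p => p.2)
      = pvR report d := by
    intro d
    rw [List.filter_map, List.map_map]
    rfl
  have hkeys :
      ((((PySem.Set.ofList report).filterMap pvParse).map Prod.swap).foldl
        (fun d p => d.modify p.1 [] fun x => x ++ [p.2])
        (id_list.foldl (fun d user => d.insert user []) PySem.Dict.empty)).keys
      = PySem.Set.ofList id_list := by
    rw [PySem.Dict.keys_foldl_modify_key _ (fun p : String × String => p.1), PySem.Dict.keys_foldl_insert,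
      PySem.Dict.keys_empty]
    have h0 : PySem.Set.update ([] : PySem.Set String) id_list = PySem.Set.ofList id_list := rfl
    rw [h0]
    apply set_update_of_mem
    intro x hx
    rcases List.mem_map.mp hx with ⟨p, hp, hpx⟩
    rcases List.mem_map.mp hp with ⟨q, hq, hqp⟩
    rw [PySem.Set.mem_ofList]
    have := (pairs_mem id_list report k hpre q hq).2
    subst hqp; subst hpx
    simpa using this
  simp only [PySem.Dict.getD_foldl_modify_append,
    getD_foldl_insert_const _ _ _ _ (PySem.Dict.getD_empty _ _), List.nil_append, hswap, hkeys]
  simp only [getD_suspend_fold (fun d => pvR report d) (fun d => ((pvR report d).length : Int) ≥ k),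
    getD_foldl_insert_const _ _ _ _ (PySem.Dict.getD_empty _ _), zero_add]

-- ===== VERDICT (by name: the statement is the Claim_ definition above) =====
theorem solution_spec : Claim_equal_solution := by
  intro id_list report k _ hpre
  unfold Spec_solution
  rw [solution_eq, solution_alt_eq _ _ _ hpre]
  refine List.map_congr_left (fun u _ => ?_)
  rw [countP_partition _ _ (PySem.Set.ofList id_list) (PySem.Set.nodup_ofList id_list)
    (fun p hp _ => (PySem.Set.mem_ofList id_list p.2).mpr (pairs_mem id_list report k hpre p hp).2)]
  refine congrArg List.sum (List.map_congr_left (fun d _ => ?_))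
  exact per_d_eq k report u d
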